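-- pv_equiv track=rewrite | github.com/MrBrantCode/unitest_baseline | mut_generate/mist_train_cf/cf_95431/solution.py | longest_string
-- ===== SOURCE A (Python) =====
-- def longest_string(strings, k):
--     max_length = -1
--     smallest_lex = ""
--
--     for string in strings:
--         if len(string) <= k:
--             if len(string) > max_length:
--                 max_length = len(string)
--                 smallest_lex = string
--             elif len(string) == max_length and string < smallest_lex:
--                 smallest_lex = string
--
--     return smallest_lex
-- ===== SOURCE B (Python) =====
-- def longest_string(strings, k):
--     candidates = [s for s in strings if len(s) <= k]
--     candidates.sort(key=lambda s: (-len(s), s))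
--     return candidates[0] if candidates else ""
-- ===== Notes on version B (the rewrite author's own statement) =====
-- stated objective: idiomatic
-- what changed: Replaces A's running-best greedy scan with running (max_length, smallest_lex) state by a filter / sort-by-(-len, s) / take-head pipeline.
import Mathlib
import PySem

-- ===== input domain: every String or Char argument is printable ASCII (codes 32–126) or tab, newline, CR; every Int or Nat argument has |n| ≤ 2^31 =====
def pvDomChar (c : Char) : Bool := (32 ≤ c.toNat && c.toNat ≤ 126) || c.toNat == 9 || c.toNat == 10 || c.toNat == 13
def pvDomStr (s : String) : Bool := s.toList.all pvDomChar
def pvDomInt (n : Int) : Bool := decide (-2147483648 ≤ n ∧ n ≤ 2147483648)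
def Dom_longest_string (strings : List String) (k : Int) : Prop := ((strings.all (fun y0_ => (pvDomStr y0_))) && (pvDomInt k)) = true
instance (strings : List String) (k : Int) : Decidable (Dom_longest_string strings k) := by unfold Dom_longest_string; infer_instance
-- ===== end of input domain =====

-- B replaces A's running-best greedy scan by a filter / sort-by-(-len, s) / take-head pipeline (idiomatic; not faster).

-- ===== PORT A =====
-- the loop body of A: the two-branch update of the state (max_length, smallest_lex)
def pvStepA (k : Int) (st : Int × String) (s : String) : Int × String :=
  if PySem.Str.len s ≤ k then
    if PySem.Str.len s > st.1 then (PySem.Str.len s, s)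
    else if PySem.Str.len s = st.1 ∧ s < st.2 then (st.1, s)
    else st
  else st

def longest_string (strings : List String) (k : Int) : String :=
  (strings.foldl (pvStepA k) (-1, "")).2

-- ===== PORT B =====
def longest_string_alt (strings : List String) (k : Int) : String :=
  match PySem.List.sorted2 (strings.filter (fun s => decide (PySem.Str.len s ≤ k)))
      (fun s => -(PySem.Str.len s)) (fun s => s) with
  | [] => ""
  | h :: _ => h

-- ===== PRECONDITION & SPEC =====
def Spec_longest_string (strings : List String) (k : Int) (out : String) : Prop := out = longest_string_alt strings k
instance (strings : List String) (k : Int) (out : String) : Decidable (Spec_longest_string strings k out) := by unfold Spec_longest_string; infer_instance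

-- ===== CLAIM (what is proved, stated in full; the proofs are below) =====
def Claim_equal_longest_string : Prop := ∀ (strings : List String) (k : Int), Dom_longest_string strings k → Spec_longest_string strings k (longest_string strings k)

-- ===== LEMMAS AND PROOFS =====

-- head of the sorted list, "" if empty (proof-side helper)
def pvHeadS : List String → String
  | [] => ""
  | h :: _ => h

-- the comparison sorted2 uses for key (-len s, s)
def pvBefore (a b : String) : Bool :=
  decide (-(PySem.Str.len a) < -(PySem.Str.len b)) ||
    (!decide (-(PySem.Str.len b) < -(PySem.Str.len a)) && decide (a < b))

lemma pvSorted2_eq (xs : List String) :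
    PySem.List.sorted2 xs (fun s => -(PySem.Str.len s)) (fun s => s) =
      xs.foldl (fun acc x => PySem.List.insertBy pvBefore x acc) [] := rfl

lemma pvLen_nonneg (s : String) : 0 ≤ PySem.Str.len s := by simp [PySem.Str.len]

lemma pvInsertBy_nil (x : String) : PySem.List.insertBy pvBefore x [] = [x] := rfl

lemma pvInsertBy_cons (x h : String) (t : List String) :
    PySem.List.insertBy pvBefore x (h :: t) =
      if pvBefore x h then x :: h :: t else h :: PySem.List.insertBy pvBefore x t := rfl

lemma pvBefore_iff (a b : String) :
    pvBefore a b = true ↔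
      (PySem.Str.len b < PySem.Str.len a ∨ (¬ PySem.Str.len a < PySem.Str.len b ∧ a < b)) := by
  simp only [pvBefore, Bool.or_eq_true, Bool.and_eq_true, Bool.not_eq_true', decide_eq_true_eq,
    decide_eq_false_iff_not]
  constructor
  · rintro (h | ⟨h1, h2⟩)
    · left; omega
    · right; exact ⟨by omega, h2⟩
  · rintro (h | ⟨h1, h2⟩)
    · left; omega
    · right; exact ⟨by omega, h2⟩

lemma pvStepA_skip (k : Int) (st : Int × String) (x : String) (hx : ¬ PySem.Str.len x ≤ k) :
    pvStepA k st x = st := by rw [pvStepA, if_neg hx]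

lemma pvStepA_take (k : Int) (st : Int × String) (x : String) (hx : PySem.Str.len x ≤ k)
    (h : PySem.Str.len x > st.1) : pvStepA k st x = (PySem.Str.len x, x) := by
  rw [pvStepA, if_pos hx, if_pos h]

lemma pvStepA_tie (k : Int) (st : Int × String) (x : String) (hx : PySem.Str.len x ≤ k)
    (h1 : ¬ PySem.Str.len x > st.1) (h2 : PySem.Str.len x = st.1) (h3 : x < st.2) :
    pvStepA k st x = (st.1, x) := by
  rw [pvStepA, if_pos hx, if_neg h1, if_pos ⟨h2, h3⟩]

lemma pvStepA_keep (k : Int) (st : Int × String) (x : String) (hx : PySem.Str.len x ≤ k)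
    (h1 : ¬ PySem.Str.len x > st.1) (h2 : ¬ (PySem.Str.len x = st.1 ∧ x < st.2)) :
    pvStepA k st x = st := by
  rw [pvStepA, if_pos hx, if_neg h1, if_neg h2]

-- loop invariant: A's state (max_length, smallest_lex) tracks the head of B's insertion-sorted candidate list
lemma pvLoop (k : Int) (l : List String) :
    ∀ (st : Int × String) (acc : List String),
      ((st = (-1, "") ∧ acc = []) ∨ (∃ r, acc = st.2 :: r ∧ st.1 = PySem.Str.len st.2)) →
      (l.foldl (pvStepA k) st).2 =
        pvHeadS ((l.filter (fun s => decide (PySem.Str.len s ≤ k))).foldl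
          (fun acc x => PySem.List.insertBy pvBefore x acc) acc) := by
  induction l with
  | nil =>
    intro st acc hinv
    rcases hinv with ⟨hst, hacc⟩ | ⟨r, hacc, _⟩
    · simp [hst, hacc, pvHeadS]
    · simp [hacc, pvHeadS]
  | cons x l ih =>
    intro st acc hinv
    by_cases hx : PySem.Str.len x ≤ k
    · have hd : decide (PySem.Str.len x ≤ k) = true := decide_eq_true hx
      simp only [List.filter_cons, hd, if_pos, List.foldl_cons]
      apply ih
      rcases hinv with ⟨hst, hacc⟩ | ⟨r, hacc, hlen⟩
      · -- first candidate: A takes it (len x ≥ 0 > -1), B's list becomes [x]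
        subst hst; subst hacc
        have hgt : PySem.Str.len x > (-1 : Int) := by have := pvLen_nonneg x; omega
        rw [pvStepA_take k _ x hx hgt, pvInsertBy_nil]
        exact Or.inr ⟨[], rfl, rfl⟩
      · subst hacc
        rw [pvInsertBy_cons]
        by_cases hb : pvBefore x st.2
        · -- x is strictly better: both the best and the head become x
          rw [if_pos hb]
          have hb' := (pvBefore_iff x st.2).mp hb
          by_cases hgt : PySem.Str.len x > st.1
          · rw [pvStepA_take k st x hx hgt]
            exact Or.inr ⟨st.2 :: r, rfl, rfl⟩
          · have heq : PySem.Str.len x = st.1 := by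
              rcases hb' with h1 | ⟨h1, _⟩ <;> omega
            have hlt : x < st.2 := by
              rcases hb' with h1 | ⟨_, h2⟩
              · omega
              · exact h2
            rw [pvStepA_tie k st x hx hgt heq hlt]
            exact Or.inr ⟨st.2 :: r, rfl, by simpa using heq.symm⟩
        · -- x is not better: A keeps its state, B's head stays st.2
          rw [if_neg hb]
          have hb' : ¬ (PySem.Str.len st.2 < PySem.Str.len x ∨
              (¬ PySem.Str.len x < PySem.Str.len st.2 ∧ x < st.2)) := by
            rw [← pvBefore_iff]; simpa using hb
          push_neg at hb'
          have hgt : ¬ PySem.Str.len x > st.1 := by omega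
          have helif : ¬ (PySem.Str.len x = st.1 ∧ x < st.2) := by
            rintro ⟨h1, h2⟩
            exact (hb'.2 (by omega)) h2
          rw [pvStepA_keep k st x hx hgt helif]
          exact Or.inr ⟨PySem.List.insertBy pvBefore x r, rfl, hlen⟩
    · have hd : decide (PySem.Str.len x ≤ k) = false := decide_eq_false hx
      simp only [List.filter_cons, hd, Bool.false_eq_true, reduceIte, List.foldl_cons]
      rw [pvStepA_skip k st x hx]
      exact ih st acc hinv

-- ===== VERDICT (by name: the statement is the Claim_ definition above) =====
theorem longest_string_spec : Claim_equal_longest_string := by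
  intro strings k _
  unfold Spec_longest_string longest_string longest_string_alt
  rw [pvSorted2_eq]
  rw [pvLoop k strings (-1, "") [] (Or.inl ⟨rfl, rfl⟩)]
  cases (strings.filter (fun s => decide (PySem.Str.len s ≤ k))).foldl
      (fun acc x => PySem.List.insertBy pvBefore x acc) [] <;> simp [pvHeadS]
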